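-- pv_equiv track=rewrite | github.com/Andre-Pham/Dynamic-Tic-Tac-Toe | dynamic_tic-tac-toe_backtracking.py | check_if_winner_exists
-- ===== SOURCE A (Python) =====
-- def check_if_winner_exists(board, required_in_a_row, competitor = 'either'):
--     '''
--     Checks if there is a certain number of elements in a row on the board,
--     that be vertically, horizontally or diagonally. If so, it returns True.
--     Otherwise, it returns False.
--     '''
--     #Check for X in a row, horizontally.
--     for row in board:
--         for index in range(len(row)):
--             for i in range(required_in_a_row):
--                 #Breaks if the row starts with an 'x', and is searching for computer wins.
--                 if competitor == 'computer' and row[index] == 'x':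
--                     break
--                 #Breaks if the row starts with an 'o', and is searching for player wins.
--                 elif competitor == 'player' and row[index] == 'o':
--                     break
--                 #Breaks if the row starts with an '_'.
--                 elif row[index] == '_':
--                     break
--                 #Checks neighbouring (horizontal) value.
--                 try:
--                     if row[index] != row[index+i]:
--                         break
--                 except:
--                     break
--                 #If a certain amount of neighbouring horizontal values are equal to each other.
--                 if i == required_in_a_row-1:
--                     return True
--     #Check for X in a row, vertically.
--     columns = list(zip(*board))
--     for column in columns:
--         for index in range(len(column)):
--             for i in range(required_in_a_row):
--                 #Breaks if the column starts with an 'x', and is searching for computer wins.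
--                 if competitor == 'computer' and column[index] == 'x':
--                     break
--                 #Breaks if the column starts with an 'o', and is searching for player wins.
--                 elif competitor == 'player' and column[index] == 'o':
--                     break
--                 #Breaks if the column starts with an '_'.
--                 elif column[index] == '_':
--                     break
--                 #Checks neighbouring (vertial) value.
--                 try:
--                     if column[index] != column[index+i+1]:
--                         break
--                 except:
--                     break
--             #If a certain amount of neighbouring vertial values are equal to each other.
--             if i == required_in_a_row-1:
--                 return True
--     #Check for diagonals.
--     for index1 in range(len(board)):
--         for index2 in range(len(board[0])):
--             diagonal_SE = True #South East
--             diagonal_SW = True #South West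
--             for i in range(required_in_a_row):
--                 #No win if the row starts with an 'x', and is searching for computer wins.
--                 if competitor == 'computer' and board[index1][index2] == 'x':
--                     diagonal_SE, diagonal_SW = False, False
--                     break
--                 #No win if the row starts with an 'o', and is searching for player wins.
--                 elif competitor == 'player' and board[index1][index2] == 'o':
--                     diagonal_SE, diagonal_SW = False, False
--                     break
--                 #No win if row starts with '_'.
--                 elif board[index1][index2] == '_':
--                     diagonal_SE, diagonal_SW = False, False
--                     break
--                 #Checks neighbouring diagonal values SE direction.
--                 try:
--                     if board[index1][index2] != board[index1+i][index2+i]: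
--                         diagonal_SE = False
--                 except:
--                     diagonal_SE = False
--                 #Makes sure it's not checking diagonal values using negative coordinates.
--                 if index2-i < 0:
--                     diagonal_SW = False
--                 #Checks neighbouring diagonal values SW direction.
--                 try:
--                     if board[index1][index2] != board[index1+i][index2-i]:
--                         diagonal_SW = False
--                 except:
--                     diagonal_SW = False
--                 #Cancels search if confirmed that it's not diagonal in either direction.
--                 if diagonal_SE == False and diagonal_SW == False:
--                     break
--             #If a certain amount of neighbouring diagonal values are equal to each other.
--             if diagonal_SE or diagonal_SW:
--                 return True
--     #If all above fails, the game isn't over yet.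
--     return False
-- ===== SOURCE B (Python) =====
-- def check_if_winner_exists(board, required_in_a_row, competitor = 'either'):
--     '''Run-length scan: extract every row, column, diagonal and anti-diagonal
--     as a line, and look for a run of required_in_a_row equal playable cells.'''
--     k = required_in_a_row
--
--     def good(v):
--         if v == '_':
--             return False
--         if competitor == 'computer' and v == 'x':
--             return False
--         if competitor == 'player' and v == 'o':
--             return False
--         return True
--
--     def has_run(line):
--         run = 0
--         prev = None
--         for v in line:
--             run = run + 1 if v == prev else 1
--             prev = v
--             if run >= k and good(v):
--                 return True
--         return False
--
--     rows = len(board)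
--     cols = len(board[0]) if board else 0
--
--     def walk(r, c, dr, dc):
--         while 0 <= r < rows and 0 <= c < cols:
--             yield board[r][c]
--             r += dr
--             c += dc
--
--     def lines():
--         for r in range(rows):
--             yield board[r]
--         for c in range(cols):
--             yield walk(0, c, 1, 0)
--         for c in range(cols):
--             yield walk(0, c, 1, 1)
--         for r in range(1, rows):
--             yield walk(r, 0, 1, 1)
--         for c in range(cols):
--             yield walk(0, c, 1, -1)
--         for r in range(1, rows):
--             yield walk(r, cols - 1, 1, -1)
--
--     return any(has_run(line) for line in lines())
-- ===== Notes on version B (the rewrite author's own statement) =====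
-- stated objective: alternative
-- what changed: A probes a length-k window from every cell in every direction with repeated window re-scans; B instead extracts each row, column, diagonal and anti-diagonal once as a line and finds a winning streak with a single-pass run-length counter per line.
-- intended difference: For required_in_a_row = 1 on a non-empty board whose cells are all blank ('_') or all belong to the opponent being filtered out, A returns True (its vertical scan tests the leftover loop variable i==0 after an immediate break, so any cell at all counts), while B returns False because no playable cell exists; a 1-in-a-row win should require at least one playable mark. — e.g. on check_if_winner_exists([["_"]], 1, "either"): A returns true, B returns false
-- outside the precondition, e.g. on check_if_winner_exists([], 0, 'either'): A returns False, B returns False; on check_if_winner_exists([['o', 'x'], ['x']], 2, 'either'): A returns True, B raises IndexError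
import Mathlib
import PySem

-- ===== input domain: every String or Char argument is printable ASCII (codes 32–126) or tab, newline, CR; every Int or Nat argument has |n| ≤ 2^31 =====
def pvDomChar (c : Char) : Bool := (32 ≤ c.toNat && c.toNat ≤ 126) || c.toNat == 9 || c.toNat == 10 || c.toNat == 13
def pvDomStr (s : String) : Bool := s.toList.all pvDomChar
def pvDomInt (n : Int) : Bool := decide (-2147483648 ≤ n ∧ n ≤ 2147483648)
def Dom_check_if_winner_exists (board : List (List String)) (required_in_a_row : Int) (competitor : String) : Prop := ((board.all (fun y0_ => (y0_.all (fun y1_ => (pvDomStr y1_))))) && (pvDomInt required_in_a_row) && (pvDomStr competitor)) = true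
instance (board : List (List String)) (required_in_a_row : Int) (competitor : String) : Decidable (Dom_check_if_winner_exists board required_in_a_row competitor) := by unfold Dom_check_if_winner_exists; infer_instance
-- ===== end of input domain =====

-- B replaces A's per-cell length-k window probing in four directions by extracting each row,
-- column, diagonal and anti-diagonal once and scanning it with a run-length counter (objective: alternative).
-- Pre_ restricts to rectangular boards and required_in_a_row ≥ 1: A raises NameError (leftover loop
-- variable) for smaller counts and IndexError on ragged boards its diagonal scan reaches.

-- ===== PORT A =====
-- inner loop of the horizontal scan: for i in range(k) with its breaks (fuel = k - i);
-- returns True iff 'return True' fires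
def hLoopA (competitor : String) (kN : Nat) (row : List String) (index : Nat) : Nat → Nat → Bool
  | _, 0 => false
  | i, fuel + 1 =>
    let v := row.getD index ""
    if competitor == "computer" && v == "x" then false
    else if competitor == "player" && v == "o" then false
    else if v == "_" then false
    else
      match getElem? row (index + i) with
      | none => false
      | some w =>
        if v != w then false
        else if i == kN - 1 then true
        else hLoopA competitor kN row index (i + 1) fuel

-- inner loop of the vertical scan (fuel = k - i); returns the value the loop variable i holds after the loop
def vLoopA (competitor : String) (kN : Nat) (col : List String) (index : Nat) : Nat → Nat → Nat
  | i, 0 => i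
  | i, fuel + 1 =>
    let v := col.getD index ""
    if competitor == "computer" && v == "x" then i
    else if competitor == "player" && v == "o" then i
    else if v == "_" then i
    else
      match getElem? col (index + i + 1) with
      | none => i
      | some w =>
        if v != w then i
        else
          match fuel with
          | 0 => i
          | _ + 1 => vLoopA competitor kN col index (i + 1) fuel

-- columns = list(zip(*board)): truncates to the shortest row
def columnsOfA (board : List (List String)) : List (List String) :=
  match board with
  | [] => []
  | r0 :: rest =>
    (List.range ((r0 :: rest).foldl (fun m row => min m row.length) r0.length)).map
      (fun c => (r0 :: rest).map (fun row => row.getD c ""))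

-- inner loop of the diagonal scan (fuel = k - i), carrying the (diagonal_SE, diagonal_SW) flags
def dLoopA (competitor : String) (kN : Nat) (board : List (List String)) (r c : Nat) :
    Nat → Bool → Bool → Nat → Bool × Bool
  | _, se, sw, 0 => (se, sw)
  | i, se, sw, fuel + 1 =>
    let v := (board.getD r []).getD c ""
    if competitor == "computer" && v == "x" then (false, false)
    else if competitor == "player" && v == "o" then (false, false)
    else if v == "_" then (false, false)
    else
      let se' :=
        match getElem? board (r + i) with
        | none => false
        | some rowi =>
          match getElem? rowi (c + i) with
          | none => false
          | some w => if v != w then false else se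
      let sw1 := if (c : Int) - (i : Int) < 0 then false else sw
      let sw' :=
        match getElem? board (r + i) with
        | none => false
        | some rowi =>
          match PySem.List.pyGet? rowi ((c : Int) - (i : Int)) with
          | none => false
          | some w => if v != w then false else sw1
      if se' == false && sw' == false then (false, false)
      else dLoopA competitor kN board r c (i + 1) se' sw' fuel

def check_if_winner_exists (board : List (List String)) (required_in_a_row : Int) (competitor : String) : Bool :=
  let kN := required_in_a_row.toNat
  let horizontal := board.any (fun row =>
    (List.range row.length).any (fun index => hLoopA competitor kN row index 0 kN))
  if horizontal then true
  else
    let columns := columnsOfA board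
    let vertical := columns.any (fun col =>
      (List.range col.length).any (fun index => vLoopA competitor kN col index 0 kN == kN - 1))
    if vertical then true
    else
      (List.range board.length).any (fun r =>
        (List.range (board.getD 0 []).length).any (fun c =>
          let p := dLoopA competitor kN board r c 0 true true kN
          p.1 || p.2))

-- ===== PORT B =====
def goodB (competitor v : String) : Bool :=
  if v == "_" then false
  else if competitor == "computer" && v == "x" then false
  else if competitor == "player" && v == "o" then false
  else true

-- has_run: single pass with a run counter
def hasRunB (k : Int) (competitor : String) : List String → Nat → Option String → Bool
  | [], _, _ => false
  | v :: rest, run, prev =>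
    let run' := if prev == some v then run + 1 else 1
    if (run' : Int) ≥ k && goodB competitor v then true
    else hasRunB k competitor rest run' (some v)

-- walk(r, c, 1, dc): collect cells until leaving the board (fuel = rows - r)
def walkB (board : List (List String)) (rows cols : Nat) : Nat → Int → Int → Nat → List String
  | _, _, _, 0 => []
  | r, c, dc, fuel + 1 =>
    if r < rows ∧ 0 ≤ c ∧ c < (cols : Int) then
      (board.getD r []).getD c.toNat "" :: walkB board rows cols (r + 1) (c + dc) dc fuel
    else []

def check_if_winner_exists_alt (board : List (List String)) (required_in_a_row : Int) (competitor : String) : Bool :=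
  let rows := board.length
  let cols := match board with | [] => 0 | r0 :: _ => r0.length
  let lines : List (List String) :=
    board
    ++ (List.range cols).map (fun (c : Nat) => walkB board rows cols 0 (c : Int) 0 rows)
    ++ (List.range cols).map (fun (c : Nat) => walkB board rows cols 0 (c : Int) 1 rows)
    ++ (List.range' 1 (rows - 1)).map (fun r => walkB board rows cols r 0 1 (rows - r))
    ++ (List.range cols).map (fun (c : Nat) => walkB board rows cols 0 (c : Int) (-1) rows)
    ++ (List.range' 1 (rows - 1)).map (fun r => walkB board rows cols r ((cols : Int) - 1) (-1) (rows - r))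
  lines.any (fun line => hasRunB required_in_a_row competitor line 0 none)

-- ===== PRECONDITION & SPEC =====
-- Pre_ requires required_in_a_row ≥ 1 (A raises NameError on a leftover loop variable otherwise)
-- and a rectangular board (A's unguarded diagonal indexing raises IndexError on ragged boards it
-- does not return early from); ragged boards are outside the function's natural domain anyway.
def Pre_check_if_winner_exists (board : List (List String)) (required_in_a_row : Int) (competitor : String) : Prop :=
  1 ≤ required_in_a_row ∧ ∀ row ∈ board, row.length = (board.headD []).length
instance (board : List (List String)) (required_in_a_row : Int) (competitor : String) : Decidable (Pre_check_if_winner_exists board required_in_a_row competitor) := by unfold Pre_check_if_winner_exists; infer_instance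
def pvWitness_check_if_winner_exists : List (List String) × Int × String := ([["x", "o"], ["x", "x"]], 2, "either")

-- For required_in_a_row = 1 on a non-empty board with non-empty rows whose cells are all '_' or all
-- filtered out by the competitor argument, A returns True (its vertical scan tests the leftover loop
-- variable i == 0 after an immediate break, so any cell at all counts) while B returns False, which is
-- intended: a 1-in-a-row win needs at least one playable mark.
def D_check_if_winner_exists (board : List (List String)) (required_in_a_row : Int) (competitor : String) : Prop :=
  required_in_a_row = 1 ∧ board ≠ [] ∧ board.headD [] ≠ [] ∧
    ∀ row ∈ board, ∀ v ∈ row,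
      v = "_" ∨ (competitor = "computer" ∧ v = "x") ∨ (competitor = "player" ∧ v = "o")
instance (board : List (List String)) (required_in_a_row : Int) (competitor : String) : Decidable (D_check_if_winner_exists board required_in_a_row competitor) := by unfold D_check_if_winner_exists; infer_instance

def Spec_check_if_winner_exists (board : List (List String)) (required_in_a_row : Int) (competitor : String) (out : Bool) : Prop := ¬ D_check_if_winner_exists board required_in_a_row competitor → out = check_if_winner_exists_alt board required_in_a_row competitor
instance (board : List (List String)) (required_in_a_row : Int) (competitor : String) (out : Bool) : Decidable (Spec_check_if_winner_exists board required_in_a_row competitor out) := by unfold Spec_check_if_winner_exists; infer_instance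

def pvDiffWitness_check_if_winner_exists : List (List String) × Int × String := ([["_"]], 1, "either")
def pvDiffWitnessOut_check_if_winner_exists : Bool × Bool := (true, false)

-- ===== CLAIM (what is proved, stated in full; the proofs are below) =====
def Claim_unchanged_check_if_winner_exists : Prop := ∀ (board : List (List String)) (required_in_a_row : Int) (competitor : String), Dom_check_if_winner_exists board required_in_a_row competitor → Pre_check_if_winner_exists board required_in_a_row competitor → Spec_check_if_winner_exists board required_in_a_row competitor (check_if_winner_exists board required_in_a_row competitor)
def Claim_changed_check_if_winner_exists : Prop := Dom_check_if_winner_exists (pvDiffWitness_check_if_winner_exists.1) (pvDiffWitness_check_if_winner_exists.2.1) (pvDiffWitness_check_if_winner_exists.2.2) ∧ Pre_check_if_winner_exists (pvDiffWitness_check_if_winner_exists.1) (pvDiffWitness_check_if_winner_exists.2.1) (pvDiffWitness_check_if_winner_exists.2.2) ∧ D_check_if_winner_exists (pvDiffWitness_check_if_winner_exists.1) (pvDiffWitness_check_if_winner_exists.2.1) (pvDiffWitness_check_if_winner_exists.2.2) ∧ check_if_winner_exists (pvDiffWitness_check_if_winner_exists.1) (pvDiffWitness_check_if_winner_exists.2.1)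 (pvDiffWitness_check_if_winner_exists.2.2) = pvDiffWitnessOut_check_if_winner_exists.1 ∧ check_if_winner_exists_alt (pvDiffWitness_check_if_winner_exists.1) (pvDiffWitness_check_if_winner_exists.2.1) (pvDiffWitness_check_if_winner_exists.2.2) = pvDiffWitnessOut_check_if_winner_exists.2 ∧ pvDiffWitnessOut_check_if_winner_exists.1 ≠ pvDiffWitnessOut_check_if_winner_exists.2
def Claim_exact_check_if_winner_exists : Prop := ∀ (board : List (List String)) (required_in_a_row : Int) (competitor : String), Dom_check_if_winner_exists board required_in_a_row competitor → Pre_check_if_winner_exists board required_in_a_row competitor → D_check_if_winner_exists board required_in_a_row competitor → check_if_winner_exists board required_in_a_row competitor ≠ check_if_winner_exists_alt board required_in_a_row competitor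

-- ===== LEMMAS AND PROOFS =====

-- cell lookup and the four window predicates (proof vocabulary)
def cellOf (board : List (List String)) (r c : Nat) : Option String := (getElem? board r).bind (fun row => getElem? row c)
def pvWinH (competitor : String) (kN : Nat) (board : List (List String)) : Prop :=
  ∃ r j v, goodB competitor v = true ∧ ∀ i < kN, cellOf board r (j + i) = some v
def pvWinV (competitor : String) (kN : Nat) (board : List (List String)) : Prop :=
  ∃ r c v, goodB competitor v = true ∧ ∀ i < kN, cellOf board (r + i) c = some v
def pvWinSE (competitor : String) (kN : Nat) (board : List (List String)) : Prop :=
  ∃ r c v, goodB competitor v = true ∧ ∀ i < kN, cellOf board (r + i) (c + i) = some v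
def pvWinSW (competitor : String) (kN : Nat) (board : List (List String)) : Prop :=
  ∃ r c v, goodB competitor v = true ∧ ∀ i < kN, i ≤ c ∧ cellOf board (r + i) (c - i) = some v
def pvWin (competitor : String) (kN : Nat) (board : List (List String)) : Prop :=
  pvWinH competitor kN board ∨ pvWinV competitor kN board ∨ pvWinSE competitor kN board ∨ pvWinSW competitor kN board
def pvLWin (competitor : String) (kN : Nat) (line : List String) : Prop :=
  ∃ j v, goodB competitor v = true ∧ ∀ i < kN, getElem? line (j + i) = some v

theorem goodB_false_iff (competitor v : String) :
    goodB competitor v = false ↔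
      (v = "_" ∨ (competitor = "computer" ∧ v = "x") ∨ (competitor = "player" ∧ v = "o")) := by
  unfold goodB; split_ifs with h1 h2 h3 <;> simp_all

theorem gateA {α : Type} (competitor v : String) (R X : α) :
    (if competitor == "computer" && v == "x" then R
     else if competitor == "player" && v == "o" then R
     else if v == "_" then R else X) = if goodB competitor v = true then X else R := by
  unfold goodB; split_ifs <;> simp_all

theorem pvLWin_nil (competitor : String) (kN : Nat) (hk : 1 ≤ kN) : ¬ pvLWin competitor kN [] := by
  rintro ⟨j, v, -, hall⟩
  have := hall 0 hk
  simp at this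

theorem pvLWin_cons (competitor : String) (kN : Nat) (hk : 1 ≤ kN) (v : String) (rest : List String) :
    pvLWin competitor kN (v :: rest) ↔
      pvLWin competitor kN rest ∨
        (goodB competitor v = true ∧ ∀ i < kN - 1, getElem? rest i = some v) := by
  constructor
  · rintro ⟨j, w, hg, hall⟩
    cases j with
    | zero =>
      right
      have h0 := hall 0 hk
      simp at h0
      subst h0
      refine ⟨hg, fun i hi => ?_⟩
      have := hall (i + 1) (by omega)
      simpa using this
    | succ j =>
      left
      refine ⟨j, w, hg, fun i hi => ?_⟩
      have := hall i hi
      rw [show j + 1 + i = (j + i) + 1 by omega] at this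
      simpa using this
  · rintro (⟨j, w, hg, hall⟩ | ⟨hg, hall⟩)
    · refine ⟨j + 1, w, hg, fun i hi => ?_⟩
      rw [show j + 1 + i = (j + i) + 1 by omega]
      simpa using hall i hi
    · refine ⟨0, v, hg, fun i hi => ?_⟩
      cases i with
      | zero => simp
      | succ i => simpa using hall i (by omega)

theorem hasRunB_iff (k : Int) (competitor : String) (hk : 1 ≤ k) :
    ∀ (line : List String) (run : Nat) (prev : Option String),
      (∀ v, prev = some v → goodB competitor v = true → run < k.toNat) →
      (hasRunB k competitor line run prev = true ↔
        (pvLWin competitor k.toNat line ∨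
          ∃ v, prev = some v ∧ goodB competitor v = true ∧ ∀ i < k.toNat - run, getElem? line i = some v)) := by
  have hk1 : 1 ≤ k.toNat := by omega
  intro line
  induction line with
  | nil =>
    intro run prev hinv
    simp only [hasRunB, Bool.false_eq_true, false_iff]
    rintro (h | ⟨v, hp, hg, hall⟩)
    · exact pvLWin_nil _ _ hk1 h
    · have := hall 0 (by have := hinv v hp hg; omega)
      simp at this
  | cons v rest ih =>
    intro run prev hinv
    rw [show hasRunB k competitor (v :: rest) run prev =
      (let run' := if prev == some v then run + 1 else 1;
       if (run' : Int) ≥ k && goodB competitor v then true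
       else hasRunB k competitor rest run' (some v)) from rfl]
    by_cases hp : prev = some v
    · subst hp
      simp only [BEq.rfl, if_pos rfl, beq_self_eq_true, if_true]
      by_cases htr : ((run + 1 : Int) ≥ k ∧ goodB competitor v = true)
      · rw [if_pos (by simp [htr.1, htr.2])]
        simp only [true_iff]
        right
        refine ⟨v, rfl, htr.2, fun i hi => ?_⟩
        have hrun := hinv v rfl htr.2
        have : k.toNat ≤ run + 1 := by omega
        have : i = 0 := by omega
        subst this
        simp
      · rw [if_neg (by
          intro hcon
          simp only [Bool.and_eq_true, decide_eq_true_eq] at hcon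
          exact htr ⟨hcon.1, hcon.2⟩)]
        have hinv' : ∀ w, (some v : Option String) = some w → goodB competitor w = true → run + 1 < k.toNat := by
          intro w hw hg
          cases hw
          have : ¬ ((run + 1 : Int) ≥ k) := fun h => htr ⟨h, hg⟩
          omega
        rw [ih (run + 1) (some v) hinv', pvLWin_cons _ _ hk1]
        constructor
        · rintro (hl | ⟨w, hw, hg, hall⟩)
          · exact Or.inl (Or.inl hl)
          · cases hw
            right
            refine ⟨v, rfl, hg, fun i hi => ?_⟩
            cases i with
            | zero => simp
            | succ i => simpa using hall i (by omega)
        · rintro ((hl | ⟨hg, hall⟩) | ⟨w, hw, hg, hall⟩)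
          · exact Or.inl hl
          · right
            refine ⟨v, rfl, hg, fun i hi => ?_⟩
            exact hall i (by omega)
          · cases hw
            right
            refine ⟨v, rfl, hg, fun i hi => ?_⟩
            have := hall (i + 1) (by have := hinv v rfl hg; omega)
            simpa using this
    · have hpb : (prev == some v) = false := by
        cases prev <;> simp_all
      simp only [hpb, if_false, Bool.false_eq_true]
      by_cases htr : ((1 : Int) ≥ k ∧ goodB competitor v = true)
      · rw [if_pos (by simp [htr.1, htr.2])]
        simp only [true_iff]
        left
        rw [pvLWin_cons _ _ hk1]
        right
        have hk1' : k.toNat = 1 := by omega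
        exact ⟨htr.2, fun i hi => by omega⟩
      · rw [if_neg (by
          intro hcon
          simp only [Bool.and_eq_true, decide_eq_true_eq] at hcon
          exact htr ⟨hcon.1, hcon.2⟩)]
        have hinv' : ∀ w, (some v : Option String) = some w → goodB competitor w = true → 1 < k.toNat := by
          intro w hw hg
          cases hw
          have : ¬ ((1 : Int) ≥ k) := fun h => htr ⟨h, hg⟩
          omega
        rw [ih 1 (some v) hinv', pvLWin_cons _ _ hk1]
        constructor
        · rintro (hl | ⟨w, hw, hg, hall⟩)
          · exact Or.inl (Or.inl hl)
          · cases hw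
            exact Or.inl (Or.inr ⟨hg, hall⟩)
        · rintro ((hl | ⟨hg, hall⟩) | ⟨w, hw, hg, hall⟩)
          · exact Or.inl hl
          · exact Or.inr ⟨v, rfl, hg, hall⟩
          · exfalso
            have hr := hinv w hw hg
            have h0 := hall 0 (by omega)
            simp at h0
            exact hp (by rw [hw, h0])

theorem walkB_get_nonneg (board : List (List String)) (rows cols : Nat) (dc : Int) (hdc : 0 ≤ dc) :
    ∀ (t r : Nat) (c : Int), 0 ≤ c →
      getElem? (walkB board rows cols r c dc (rows - r)) t =
        if r + t < rows ∧ c + t * dc < (cols : Int) then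
          some ((board.getD (r + t) []).getD (c + t * dc).toNat "") else none := by
  intro t
  induction t with
  | zero =>
    intro r c hc
    by_cases hr : r < rows
    · rw [show rows - r = (rows - (r + 1)) + 1 by omega]
      simp only [walkB]
      by_cases hcc : c < (cols : Int)
      · rw [if_pos ⟨hr, hc, hcc⟩]
        simp [hr, hcc]
      · rw [if_neg (by tauto)]
        simp [hr, hcc]
    · rw [show rows - r = 0 by omega]
      simp only [walkB]
      rw [if_neg (by omega)]
      simp
  | succ t ih =>
    intro r c hc
    by_cases hr : r < rows
    · rw [show rows - r = (rows - (r + 1)) + 1 by omega]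
      simp only [walkB]
      by_cases hcc : c < (cols : Int)
      · rw [if_pos ⟨hr, hc, hcc⟩]
        rw [List.getElem?_cons_succ]
        have := ih (r + 1) (c + dc) (by omega)
        rw [this]
        rw [show r + 1 + t = r + (t + 1) by omega, show c + dc + t * dc = c + (t + 1) * dc by ring]
        norm_cast
      · rw [if_neg (by tauto)]
        have : ¬ (c + (t + 1) * dc < (cols : Int)) := by nlinarith
        rw [if_neg (by tauto)]
        simp
    · rw [show rows - r = 0 by omega]
      simp only [walkB]
      rw [if_neg (by omega)]
      simp

theorem walkB_get_neg (board : List (List String)) (rows cols : Nat) :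
    ∀ (t r : Nat) (c : Int), c < (cols : Int) →
      getElem? (walkB board rows cols r c (-1) (rows - r)) t =
        if r + t < rows ∧ 0 ≤ c - t then
          some ((board.getD (r + t) []).getD (c - t).toNat "") else none := by
  intro t
  induction t with
  | zero =>
    intro r c hc
    by_cases hr : r < rows
    · rw [show rows - r = (rows - (r + 1)) + 1 by omega]
      simp only [walkB]
      by_cases hcc : 0 ≤ c
      · rw [if_pos ⟨hr, hcc, hc⟩]
        simp [hr, hcc]
      · rw [if_neg (by tauto)]
        simp [hr, hcc]
    · rw [show rows - r = 0 by omega]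
      simp only [walkB]
      rw [if_neg (by omega)]
      simp
  | succ t ih =>
    intro r c hc
    by_cases hr : r < rows
    · rw [show rows - r = (rows - (r + 1)) + 1 by omega]
      simp only [walkB]
      by_cases hcc : 0 ≤ c
      · rw [if_pos ⟨hr, hcc, hc⟩]
        rw [List.getElem?_cons_succ]
        have := ih (r + 1) (c - 1) (by omega)
        rw [show c + -1 = c - 1 by ring, this]
        rw [show r + 1 + t = r + (t + 1) by omega, show c - 1 - (t : Int) = c - ((t + 1 : Nat) : Int) by push_cast; ring]
      · rw [if_neg (by tauto)]
        have : ¬ (0 ≤ c - (t + 1 : Nat)) := by push_cast; omega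
        rw [if_neg (by tauto)]
        simp
    · rw [show rows - r = 0 by omega]
      simp only [walkB]
      rw [if_neg (by omega)]
      simp

theorem cellOf_rect (board : List (List String)) (W : Nat)
    (hrect : ∀ row ∈ board, row.length = W) (r c : Nat) :
    cellOf board r c =
      if r < board.length ∧ c < W then some ((board.getD r []).getD c "") else none := by
  unfold cellOf
  cases h : getElem? board r with
  | none =>
    have := List.getElem?_eq_none_iff.mp h
    rw [if_neg (by omega)]
    rfl
  | some row =>
    have hlt : r < board.length := by
      by_contra hge
      rw [List.getElem?_eq_none_iff.mpr (by omega)] at h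
      simp at h
    have hmem : row ∈ board := by
      have := List.getElem?_eq_some_iff.mp h
      obtain ⟨hr, heq⟩ := this
      exact heq ▸ List.getElem_mem hr
    have hW : row.length = W := hrect row hmem
    have hgetD : board.getD r [] = row := by
      rw [List.getD_eq_getElem?_getD, h]; rfl
    simp only [Option.bind_some, hgetD]
    by_cases hc : c < W
    · rw [if_pos ⟨hlt, hc⟩]
      rw [List.getElem?_eq_getElem (by omega), List.getD_eq_getElem?_getD,
        List.getElem?_eq_getElem (by omega)]
      rfl
    · rw [if_neg (by tauto), List.getElem?_eq_none_iff.mpr (by omega)]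

theorem hasRunB_top (k : Int) (competitor : String) (hk : 1 ≤ k) (line : List String) :
    (hasRunB k competitor line 0 none = true ↔ pvLWin competitor k.toNat line) := by
  rw [hasRunB_iff k competitor hk line 0 none (by intro v h; simp at h)]
  simp

theorem colLine_get (board : List (List String)) (W : Nat)
    (hrect : ∀ row ∈ board, row.length = W) (c : Nat) (t : Nat) :
    getElem? (walkB board board.length W 0 (c : Int) 0 board.length) t = cellOf board t c := by
  have h := walkB_get_nonneg board board.length W 0 le_rfl t 0 (c : Int) (by positivity)
  rw [Nat.sub_zero] at h
  rw [h, cellOf_rect board W hrect]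
  simp

theorem seLine_get (board : List (List String)) (W : Nat)
    (hrect : ∀ row ∈ board, row.length = W) (r0 c0 : Nat) (t : Nat) :
    getElem? (walkB board board.length W r0 (c0 : Int) 1 (board.length - r0)) t =
      cellOf board (r0 + t) (c0 + t) := by
  have h := walkB_get_nonneg board board.length W 1 (by norm_num) t r0 (c0 : Int) (by positivity)
  rw [h, cellOf_rect board W hrect]
  norm_num
  rw [show ((c0 : Int) + t).toNat = c0 + t by omega]
  norm_cast

theorem swLine_get (board : List (List String)) (W : Nat)
    (hrect : ∀ row ∈ board, row.length = W) (r0 : Nat) (c0 : Int) (hcW : c0 < (W : Int)) (t : Nat) :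
    getElem? (walkB board board.length W r0 c0 (-1) (board.length - r0)) t =
      if (t : Int) ≤ c0 then cellOf board (r0 + t) (c0 - t).toNat else none := by
  rw [walkB_get_neg board board.length W t r0 c0 hcW, cellOf_rect board W hrect]
  by_cases ht : (t : Int) ≤ c0
  · rw [if_pos ht]
    have h1 : (c0 - t).toNat < W := by omega
    by_cases h2 : r0 + t < board.length
    · rw [if_pos ⟨h2, by omega⟩, if_pos ⟨h2, h1⟩]
    · rw [if_neg (by tauto), if_neg (by tauto)]
  · rw [if_neg (by omega), if_neg ht]

theorem rowsWin (competitor : String) (kN : Nat) (board : List (List String)) (hk1 : 1 ≤ kN) :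
    (∃ line ∈ board, pvLWin competitor kN line) ↔ pvWinH competitor kN board := by
  constructor
  · rintro ⟨line, hmem, j, v, hg, hall⟩
    obtain ⟨r, hr⟩ := List.mem_iff_getElem?.mp hmem
    exact ⟨r, j, v, hg, fun i hi => by unfold cellOf; rw [hr]; simpa using hall i hi⟩
  · rintro ⟨r, j, v, hg, hall⟩
    have h0 := hall 0 hk1
    unfold cellOf at h0
    cases hline : getElem? board r with
    | none => rw [hline] at h0; simp at h0
    | some line =>
      refine ⟨line, List.mem_iff_getElem?.mpr ⟨r, hline⟩, j, v, hg, fun i hi => ?_⟩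
      have := hall i hi
      unfold cellOf at this
      rw [hline] at this
      simpa using this

theorem colsWin (competitor : String) (kN : Nat) (board : List (List String)) (W : Nat)
    (hrect : ∀ row ∈ board, row.length = W) (hk1 : 1 ≤ kN) :
    (∃ c < W, pvLWin competitor kN (walkB board board.length W 0 (c : Int) 0 board.length)) ↔
      pvWinV competitor kN board := by
  constructor
  · rintro ⟨c, hc, j, v, hg, hall⟩
    refine ⟨j, c, v, hg, fun i hi => ?_⟩
    rw [← colLine_get board W hrect c (j + i)]
    exact hall i hi
  · rintro ⟨r, c, v, hg, hall⟩
    have h0 := hall 0 hk1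
    rw [cellOf_rect board W hrect] at h0
    have hc : c < W := by by_contra hge; rw [if_neg (by tauto)] at h0; simp at h0
    refine ⟨c, hc, r, v, hg, fun i hi => ?_⟩
    rw [colLine_get board W hrect c (r + i)]
    exact hall i hi

theorem seWin (competitor : String) (kN : Nat) (board : List (List String)) (W : Nat)
    (hrect : ∀ row ∈ board, row.length = W) (hk1 : 1 ≤ kN) :
    ((∃ c < W, pvLWin competitor kN (walkB board board.length W 0 (c : Int) 1 board.length)) ∨
      (∃ r, 1 ≤ r ∧ r < board.length ∧
        pvLWin competitor kN (walkB board board.length W r 0 1 (board.length - r)))) ↔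
      pvWinSE competitor kN board := by
  have hline0 : ∀ (c : Nat) (t : Nat),
      getElem? (walkB board board.length W 0 (c : Int) 1 board.length) t = cellOf board t (c + t) := by
    intro c t
    have := seLine_get board W hrect 0 c t
    rw [Nat.sub_zero] at this
    simpa using this
  constructor
  · rintro (⟨c, hc, j, v, hg, hall⟩ | ⟨r, hr1, hrl, j, v, hg, hall⟩)
    · refine ⟨j, c + j, v, hg, fun i hi => ?_⟩
      have := hall i hi
      rw [hline0 c (j + i)] at this
      rw [show c + j + i = c + (j + i) by omega]
      exact this
    · refine ⟨r + j, j, v, hg, fun i hi => ?_⟩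
      have := hall i hi
      have hse := seLine_get board W hrect r 0 (j + i)
      rw [Nat.cast_zero] at hse
      rw [hse] at this
      convert this using 2 <;> omega
  · rintro ⟨r, c, v, hg, hall⟩
    by_cases hrc : r ≤ c
    · left
      have h0 := hall 0 hk1
      rw [cellOf_rect board W hrect] at h0
      have hcW : c < W := by by_contra hge; rw [if_neg (by tauto)] at h0; simp at h0
      refine ⟨c - r, by omega, r, v, hg, fun i hi => ?_⟩
      rw [hline0 (c - r) (r + i), show c - r + (r + i) = c + i by omega]
      exact hall i hi
    · right
      have h0 := hall 0 hk1
      rw [cellOf_rect board W hrect] at h0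
      have hrl : r < board.length := by by_contra hge; rw [if_neg (by tauto)] at h0; simp at h0
      refine ⟨r - c, by omega, by omega, c, v, hg, fun i hi => ?_⟩
      have hse := seLine_get board W hrect (r - c) 0 (c + i)
      rw [Nat.cast_zero] at hse
      rw [hse, show r - c + (c + i) = r + i by omega, show 0 + (c + i) = c + i by omega]
      exact hall i hi

theorem swWin (competitor : String) (kN : Nat) (board : List (List String)) (W : Nat)
    (hrect : ∀ row ∈ board, row.length = W) (hk1 : 1 ≤ kN) :
    ((∃ c < W, pvLWin competitor kN (walkB board board.length W 0 (c : Int) (-1) board.length)) ∨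
      (∃ r, 1 ≤ r ∧ r < board.length ∧
        pvLWin competitor kN
          (walkB board board.length W r ((W : Int) - 1) (-1) (board.length - r)))) ↔
      pvWinSW competitor kN board := by
  have hget0 : ∀ (c : Nat), c < W → ∀ (t : Nat),
      getElem? (walkB board board.length W 0 (c : Int) (-1) board.length) t =
        if (t : Int) ≤ (c : Int) then cellOf board t ((c : Int) - t).toNat else none := by
    intro c hc t
    have h := swLine_get board W hrect 0 (c : Int) (by exact_mod_cast hc) t
    rw [Nat.sub_zero] at h
    simpa using h
  have hget1 : ∀ (r : Nat) (t : Nat),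
      getElem? (walkB board board.length W r ((W : Int) - 1) (-1) (board.length - r)) t =
        if (t : Int) ≤ (W : Int) - 1 then cellOf board (r + t) ((W : Int) - 1 - t).toNat else none := by
    intro r t
    exact swLine_get board W hrect r ((W : Int) - 1) (by omega) t
  constructor
  · rintro (⟨c, hc, j, v, hg, hall⟩ | ⟨r, hr1, hrl, j, v, hg, hall⟩)
    · have hall' : ∀ i < kN, j + i ≤ c ∧ cellOf board (j + i) (c - (j + i)) = some v := by
        intro i hi
        have h := hall i hi
        rw [hget0 c hc (j + i)] at h
        by_cases hle : ((j + i : Nat) : Int) ≤ (c : Int)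
        · rw [if_pos hle] at h
          refine ⟨by exact_mod_cast hle, ?_⟩
          rw [show ((c : Int) - ((j + i : Nat) : Int)).toNat = c - (j + i) by omega] at h
          exact h
        · rw [if_neg hle] at h; simp at h
      have hj : j ≤ c := by have := (hall' 0 hk1).1; omega
      refine ⟨j, c - j, v, hg, fun i hi => ?_⟩
      obtain ⟨h1, h2⟩ := hall' i hi
      refine ⟨by omega, ?_⟩
      rw [show c - j - i = c - (j + i) by omega]
      exact h2
    · have hall' : ∀ i < kN, (((j + i : Nat) : Int) ≤ (W : Int) - 1) ∧
          cellOf board (r + (j + i)) (((W : Int) - 1 - ((j + i : Nat) : Int)).toNat) = some v := by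
        intro i hi
        have h := hall i hi
        rw [hget1 r (j + i)] at h
        by_cases hle : ((j + i : Nat) : Int) ≤ (W : Int) - 1
        · rw [if_pos hle] at h; exact ⟨hle, h⟩
        · rw [if_neg hle] at h; simp at h
      have hj : (j : Int) ≤ (W : Int) - 1 := by have := (hall' 0 hk1).1; push_cast at this ⊢; omega
      have hW1 : 1 ≤ W := by omega
      refine ⟨r + j, W - 1 - j, v, hg, fun i hi => ?_⟩
      obtain ⟨h1, h2⟩ := hall' i hi
      refine ⟨by push_cast at h1; omega, ?_⟩
      rw [show ((W : Int) - 1 - ((j + i : Nat) : Int)).toNat = W - 1 - j - i by push_cast; omega] at h2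
      rw [show r + j + i = r + (j + i) by omega]
      exact h2
  · rintro ⟨r, c, v, hg, hall⟩
    obtain ⟨-, h0⟩ := hall 0 hk1
    rw [Nat.sub_zero, cellOf_rect board W hrect] at h0
    simp only [Nat.add_zero] at h0
    have hb : r < board.length ∧ c < W := by
      by_contra hge; rw [if_neg hge] at h0; simp at h0
    obtain ⟨hrl, hcW⟩ := hb
    by_cases hcase : r + c < W
    · left
      refine ⟨r + c, hcase, r, v, hg, fun i hi => ?_⟩
      obtain ⟨h1, h2⟩ := hall i hi
      rw [hget0 (r + c) hcase (r + i)]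
      rw [if_pos (by push_cast; omega)]
      rw [show (((r + c : Nat) : Int) - ((r + i : Nat) : Int)).toNat = c - i by push_cast; omega]
      exact h2
    · right
      refine ⟨r - (W - 1 - c), by omega, by omega, W - 1 - c, v, hg, fun i hi => ?_⟩
      obtain ⟨h1, h2⟩ := hall i hi
      rw [hget1 (r - (W - 1 - c)) (W - 1 - c + i)]
      rw [if_pos (by push_cast; omega)]
      rw [show ((W : Int) - 1 - ((W - 1 - c + i : Nat) : Int)).toNat = c - i by push_cast; omega]
      rw [show r - (W - 1 - c) + (W - 1 - c + i) = r + i by omega]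
      exact h2

theorem pvExMapRange {α : Type} (n : Nat) (f : Nat → α) (P : α → Prop) :
    (∃ x ∈ List.map f (List.range n), P x) ↔ ∃ c < n, P (f c) := by
  constructor
  · rintro ⟨x, hx, hP⟩
    obtain ⟨c, hc, rfl⟩ := List.mem_map.mp hx
    exact ⟨c, List.mem_range.mp hc, hP⟩
  · rintro ⟨c, hc, hP⟩
    exact ⟨f c, List.mem_map_of_mem (List.mem_range.mpr hc), hP⟩

theorem pvExMapRange' (m : Nat) (f : Nat → List String) (P : List String → Prop) :
    (∃ x ∈ List.map f (List.range' 1 m), P x) ↔ ∃ r, 1 ≤ r ∧ r < 1 + m ∧ P (f r) := by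
  constructor
  · rintro ⟨x, hx, hP⟩
    obtain ⟨r, hr, rfl⟩ := List.mem_map.mp hx
    obtain ⟨h1, h2⟩ := List.mem_range'_1.mp hr
    exact ⟨r, h1, h2, hP⟩
  · rintro ⟨r, h1, h2, hP⟩
    exact ⟨f r, List.mem_map_of_mem (List.mem_range'_1.mpr ⟨h1, h2⟩), hP⟩

theorem alt_iff (board : List (List String)) (k : Int) (competitor : String)
    (hk : 1 ≤ k) (hrect : ∀ row ∈ board, row.length = (board.headD []).length) :
    (check_if_winner_exists_alt board k competitor = true ↔ pvWin competitor k.toNat board) := by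
  have hk1 : 1 ≤ k.toNat := by omega
  cases board with
  | nil =>
    have hfalse : check_if_winner_exists_alt [] k competitor = false := rfl
    rw [hfalse]
    simp only [Bool.false_eq_true, false_iff]
    rintro (⟨r, j, v, hg, hall⟩ | ⟨r, c, v, hg, hall⟩ | ⟨r, c, v, hg, hall⟩ | ⟨r, c, v, hg, hall⟩)
    · have := hall 0 hk1; unfold cellOf at this; simp at this
    · have := hall 0 hk1; unfold cellOf at this; simp at this
    · have := hall 0 hk1; unfold cellOf at this; simp at this
    · have := (hall 0 hk1).2; unfold cellOf at this; simp at this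
  | cons r0 rest =>
    have hrect' : ∀ row ∈ (r0 :: rest), row.length = r0.length := hrect
    have key : check_if_winner_exists_alt (r0 :: rest) k competitor = true ↔
        ((((((∃ line ∈ (r0 :: rest), pvLWin competitor k.toNat line) ∨
         (∃ c < r0.length, pvLWin competitor k.toNat
            (walkB (r0 :: rest) (r0 :: rest).length r0.length 0 (c : Int) 0 (r0 :: rest).length))) ∨
         (∃ c < r0.length, pvLWin competitor k.toNat
            (walkB (r0 :: rest) (r0 :: rest).length r0.length 0 (c : Int) 1 (r0 :: rest).length))) ∨
          (∃ r, 1 ≤ r ∧ r < (r0 :: rest).length ∧ pvLWin competitor k.toNat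
            (walkB (r0 :: rest) (r0 :: rest).length r0.length r 0 1 ((r0 :: rest).length - r)))) ∨
         (∃ c < r0.length, pvLWin competitor k.toNat
            (walkB (r0 :: rest) (r0 :: rest).length r0.length 0 (c : Int) (-1) (r0 :: rest).length))) ∨
          (∃ r, 1 ≤ r ∧ r < (r0 :: rest).length ∧ pvLWin competitor k.toNat
            (walkB (r0 :: rest) (r0 :: rest).length r0.length r ((r0.length : Int) - 1) (-1)
              ((r0 :: rest).length - r)))) := by
      simp only [check_if_winner_exists_alt, List.any_append, Bool.or_eq_true,
        List.any_eq_true, pvExMapRange, pvExMapRange',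
        show 1 + ((r0 :: rest).length - 1) = (r0 :: rest).length from by simp; omega,
        hasRunB_top k competitor hk]
    rw [key]
    unfold pvWin
    constructor
    · rintro (((((hH | hVc) | hSEc) | hSEr) | hSWc) | hSWr)
      · exact Or.inl ((rowsWin competitor k.toNat _ hk1).mp hH)
      · exact Or.inr (Or.inl ((colsWin competitor k.toNat _ r0.length hrect' hk1).mp hVc))
      · exact Or.inr (Or.inr (Or.inl ((seWin competitor k.toNat _ r0.length hrect' hk1).mp (Or.inl hSEc))))
      · exact Or.inr (Or.inr (Or.inl ((seWin competitor k.toNat _ r0.length hrect' hk1).mp (Or.inr hSEr))))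
      · exact Or.inr (Or.inr (Or.inr ((swWin competitor k.toNat _ r0.length hrect' hk1).mp (Or.inl hSWc))))
      · exact Or.inr (Or.inr (Or.inr ((swWin competitor k.toNat _ r0.length hrect' hk1).mp (Or.inr hSWr))))
    · rintro (hH | hV | hSE | hSW)
      · exact Or.inl (Or.inl (Or.inl (Or.inl (Or.inl ((rowsWin competitor k.toNat _ hk1).mpr hH)))))
      · exact Or.inl (Or.inl (Or.inl (Or.inl (Or.inr ((colsWin competitor k.toNat _ r0.length hrect' hk1).mpr hV)))))
      · rcases (seWin competitor k.toNat _ r0.length hrect' hk1).mpr hSE with h | h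
        · exact Or.inl (Or.inl (Or.inl (Or.inr h)))
        · exact Or.inl (Or.inl (Or.inr h))
      · rcases (swWin competitor k.toNat _ r0.length hrect' hk1).mpr hSW with h | h
        · exact Or.inl (Or.inr h)
        · exact Or.inr h

theorem hLoopA_gen (competitor : String) (kN : Nat) (row : List String) (index : Nat) :
    ∀ fuel i, fuel = kN - i → i < kN →
      (hLoopA competitor kN row index i fuel = true ↔
        (goodB competitor (row.getD index "") = true ∧
          ∀ j, i ≤ j → j < kN → getElem? row (index + j) = some (row.getD index ""))) := by
  intro fuel
  induction fuel generalizing index with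
  | zero => intro i h hi; omega
  | succ f ih =>
    intro i h hi
    simp only [hLoopA]
    rw [gateA]
    by_cases hg : goodB competitor (row.getD index "") = true
    · rw [if_pos hg]
      cases hlook : getElem? row (index + i) with
      | none =>
        simp only [Bool.false_eq_true, false_iff, not_and]
        intro _ hall
        have := hall i le_rfl hi
        rw [hlook] at this
        simp at this
      | some w =>
        dsimp only
        by_cases hvw : row.getD index "" = w
        · rw [if_neg (by simp only [bne_iff_ne, ne_eq, Decidable.not_not]; exact hvw)]
          by_cases hend : i = kN - 1
          · rw [if_pos (by simp [hend])]
            simp only [true_iff]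
            refine ⟨hg, fun j h1 h2 => ?_⟩
            have : j = i := by omega
            subst this
            rw [hlook, hvw]
          · rw [if_neg (by simp only [beq_iff_eq]; exact hend)]
            rw [ih index (i + 1) (by omega) (by omega)]
            constructor
            · rintro ⟨hg', hall⟩
              refine ⟨hg, fun j h1 h2 => ?_⟩
              by_cases hji : j = i
              · subst hji; rw [hlook, hvw]
              · exact hall j (by omega) h2
            · rintro ⟨hg', hall⟩
              exact ⟨hg', fun j h1 h2 => hall j (by omega) h2⟩
        · rw [if_pos (by simp only [bne_iff_ne, ne_eq, decide_eq_true_eq]; exact hvw)]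
          simp only [Bool.false_eq_true, false_iff, not_and]
          intro _ hall
          have := hall i le_rfl hi
          rw [hlook] at this
          simp at this
          exact hvw this.symm
    · rw [if_neg hg]
      simp only [Bool.false_eq_true, false_iff, not_and]
      intro hg'
      exact absurd hg' hg

theorem horizWin (competitor : String) (kN : Nat) (board : List (List String)) (hk1 : 1 ≤ kN) :
    (board.any (fun row =>
        (List.range row.length).any (fun index => hLoopA competitor kN row index 0 kN)) = true ↔
      pvWinH competitor kN board) := by
  rw [List.any_eq_true]
  constructor
  · rintro ⟨row, hmem, hany⟩
    rw [List.any_eq_true] at hany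
    obtain ⟨index, hidx, hloop⟩ := hany
    rw [List.mem_range] at hidx
    rw [hLoopA_gen competitor kN row index kN 0 (by omega) (by omega)] at hloop
    obtain ⟨hg, hall⟩ := hloop
    obtain ⟨r, hr⟩ := List.mem_iff_getElem?.mp hmem
    refine ⟨r, index, row.getD index "", hg, fun i hi => ?_⟩
    unfold cellOf
    rw [hr]
    simpa using hall i (by omega) hi
  · rintro ⟨r, j, v, hg, hall⟩
    have h0 := hall 0 hk1
    unfold cellOf at h0
    cases hrow : getElem? board r with
    | none => rw [hrow] at h0; simp at h0
    | some row =>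
      rw [hrow] at h0
      simp only [Option.bind_some, Nat.add_zero] at h0
      have hjlen : j < row.length := by
        by_contra hge
        rw [List.getElem?_eq_none_iff.mpr (by omega)] at h0
        simp at h0
      have hgetD : row.getD j "" = v := by
        rw [List.getD_eq_getElem?_getD, h0]; rfl
      refine ⟨row, List.mem_iff_getElem?.mpr ⟨r, hrow⟩, ?_⟩
      rw [List.any_eq_true]
      refine ⟨j, List.mem_range.mpr hjlen, ?_⟩
      rw [hLoopA_gen competitor kN row j kN 0 (by omega) (by omega)]
      rw [hgetD]
      refine ⟨hg, fun i _ hi => ?_⟩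
      have := hall i hi
      unfold cellOf at this
      rw [hrow] at this
      simpa using this

theorem vLoopA_bad (competitor : String) (kN : Nat) (col : List String) (index : Nat)
    (hg : ¬ goodB competitor (col.getD index "") = true) :
    ∀ fuel i, vLoopA competitor kN col index i fuel = i := by
  intro fuel i
  cases fuel with
  | zero => rfl
  | succ f =>
    simp only [vLoopA]
    rw [gateA, if_neg hg]

theorem vLoopA_gen (competitor : String) (kN : Nat) (col : List String) (index : Nat)
    (hg : goodB competitor (col.getD index "") = true) :
    ∀ fuel i, fuel = kN - i → i < kN →
      (vLoopA competitor kN col index i fuel = kN - 1 ↔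
        ∀ j, i ≤ j → j < kN - 1 → getElem? col (index + j + 1) = some (col.getD index "")) := by
  intro fuel
  induction fuel with
  | zero => intro i h hi; omega
  | succ f ih =>
    intro i h hi
    simp only [vLoopA]
    rw [gateA, if_pos hg]
    cases hlook : getElem? col (index + i + 1) with
    | none =>
      dsimp only
      constructor
      · intro hres
        intro j h1 h2
        have : i = kN - 1 := by omega
        omega
      · intro hall
        by_cases hend : i = kN - 1
        · omega
        · exfalso
          have := hall i le_rfl (by omega)
          rw [hlook] at this
          simp at this
    | some w =>
      dsimp only
      by_cases hvw : col.getD index "" = w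
      · rw [if_neg (by simp only [bne_iff_ne, ne_eq, Decidable.not_not]; exact hvw)]
        by_cases hcont : i + 1 < kN
        · obtain ⟨n, rfl⟩ : ∃ n, f = n + 1 := ⟨f - 1, by omega⟩
          dsimp only
          rw [ih (i + 1) (by omega) hcont]
          constructor
          · intro hall j h1 h2
            by_cases hji : j = i
            · subst hji; rw [hlook, hvw]
            · exact hall j (by omega) h2
          · intro hall j h1 h2
            exact hall j (by omega) h2
        · have hf0 : f = 0 := by omega
          subst hf0
          dsimp only
          have : i = kN - 1 := by omega
          constructor
          · intro _ j h1 h2; omega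
          · intro _; omega
      · rw [if_pos (by simp only [bne_iff_ne, ne_eq, decide_eq_true_eq]; exact hvw)]
        constructor
        · intro hres j h1 h2
          have : i = kN - 1 := by omega
          omega
        · intro hall
          by_cases hend : i = kN - 1
          · omega
          · exfalso
            have := hall i le_rfl (by omega)
            rw [hlook] at this
            simp at this
            exact hvw this.symm

theorem foldl_min_rect : ∀ (l : List (List String)) (W : Nat),
    (∀ row ∈ l, row.length = W) → l.foldl (fun m row => min m row.length) W = W := by
  intro l
  induction l with
  | nil => intro W _; rfl
  | cons r t ih =>
    intro W hrect
    have hr : r.length = W := hrect r (by simp)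
    simp only [List.foldl_cons, hr, min_self]
    exact ih W (fun row hm => hrect row (by simp [hm]))

theorem colGet (board : List (List String)) (W : Nat)
    (hrect : ∀ row ∈ board, row.length = W) (c : Nat) (hc : c < W) (t : Nat) :
    getElem? (board.map (fun row => row.getD c "")) t = cellOf board t c := by
  rw [List.getElem?_map, cellOf_rect board W hrect]
  cases h : getElem? board t with
  | none =>
    have := List.getElem?_eq_none_iff.mp h
    rw [if_neg (by omega)]
    rfl
  | some row =>
    have hlt : t < board.length := by
      by_contra hge
      rw [List.getElem?_eq_none_iff.mpr (by omega)] at h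
      simp at h
    have hW : row.length = W := hrect row (by
      have := List.getElem?_eq_some_iff.mp h
      obtain ⟨hr, heq⟩ := this
      exact heq ▸ List.getElem_mem hr)
    have hgetD : board.getD t [] = row := by
      rw [List.getD_eq_getElem?_getD, h]; rfl
    rw [if_pos ⟨hlt, hc⟩, hgetD]
    simp only [Option.map_some, Option.some.injEq]

theorem vertWin (competitor : String) (kN : Nat) (board : List (List String)) (W : Nat)
    (hboard : board ≠ []) (hW : (board.headD []).length = W)
    (hrect : ∀ row ∈ board, row.length = W) (hk1 : 1 ≤ kN) :
    ((columnsOfA board).any (fun col =>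
        (List.range col.length).any (fun index =>
          vLoopA competitor kN col index 0 kN == kN - 1)) = true ↔
      (pvWinV competitor kN board ∨
        (kN = 1 ∧ ∃ r c v, cellOf board r c = some v ∧ goodB competitor v = false))) := by
  obtain ⟨r0, rest, rfl⟩ : ∃ r0 rest, board = r0 :: rest := by
    cases board with
    | nil => exact absurd rfl hboard
    | cons a b => exact ⟨a, b, rfl⟩
  have hW0 : r0.length = W := by simpa using hW
  have hcols : columnsOfA (r0 :: rest) =
      (List.range W).map (fun c => (r0 :: rest).map (fun row => row.getD c "")) := by
    unfold columnsOfA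
    dsimp only
    rw [show (r0 :: rest).foldl (fun m row => min m row.length) r0.length = W by
      rw [hW0]; exact foldl_min_rect _ W hrect]
  rw [hcols, List.any_map, List.any_eq_true]
  simp only [List.mem_range, Function.comp]
  constructor
  · rintro ⟨c, hc, hany⟩
    rw [List.any_eq_true] at hany
    obtain ⟨index, hidx, hloop⟩ := hany
    rw [List.mem_range, List.length_map] at hidx
    rw [beq_iff_eq] at hloop
    set colc := (r0 :: rest).map (fun row => row.getD c "") with hcolc
    have hcell0 : getElem? colc index = cellOf (r0 :: rest) index c :=
      colGet (r0 :: rest) W hrect c hc index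
    have hvval : cellOf (r0 :: rest) index c = some (colc.getD index "") := by
      rw [← hcell0, List.getD_eq_getElem?_getD, List.getElem?_eq_getElem (by simp only [hcolc, List.length_map]; simpa using hidx)]
      rfl
    by_cases hg : goodB competitor (colc.getD index "") = true
    · left
      rw [vLoopA_gen competitor kN colc index hg kN 0 (by omega) (by omega)] at hloop
      refine ⟨index, c, colc.getD index "", hg, fun i hi => ?_⟩
      cases i with
      | zero => simpa using hvval
      | succ j =>
        have := hloop j (by omega) (by omega)
        rw [colGet (r0 :: rest) W hrect c hc (index + j + 1)] at this
        rw [show index + (j + 1) = index + j + 1 by omega]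
        exact this
    · right
      rw [vLoopA_bad competitor kN colc index hg kN 0] at hloop
      exact ⟨by omega, index, c, colc.getD index "", hvval, by simpa using hg⟩
  · rintro (⟨r, c, v, hg, hall⟩ | ⟨hkN1, r, c, v, hcell, hbad⟩)
    · have h0 := hall 0 hk1
      rw [Nat.add_zero, cellOf_rect _ W hrect] at h0
      have hb : r < (r0 :: rest).length ∧ c < W := by
        by_contra hge; rw [if_neg hge] at h0; simp at h0
      refine ⟨c, hb.2, ?_⟩
      rw [List.any_eq_true]
      set colc := (r0 :: rest).map (fun row => row.getD c "") with hcolc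
      have hgetD : colc.getD r "" = v := by
        rw [List.getD_eq_getElem?_getD, colGet (r0 :: rest) W hrect c hb.2 r]
        have h0' := hall 0 hk1
        rw [Nat.add_zero] at h0'
        rw [h0']
        rfl
      refine ⟨r, List.mem_range.mpr (by simp only [hcolc, List.length_map]; exact hb.1), ?_⟩
      rw [beq_iff_eq]
      rw [vLoopA_gen competitor kN colc r (by rw [hgetD]; exact hg) kN 0 (by omega) (by omega)]
      intro j _ hj
      rw [colGet (r0 :: rest) W hrect c hb.2 (r + j + 1), hgetD]
      have := hall (j + 1) (by omega)
      rw [show r + (j + 1) = r + j + 1 by omega] at this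
      exact this
    · rw [cellOf_rect _ W hrect] at hcell
      have hb : r < (r0 :: rest).length ∧ c < W := by
        by_contra hge; rw [if_neg hge] at hcell; simp at hcell
      have hval : ((r0 :: rest).getD r []).getD c "" = v := by
        rw [if_pos hb] at hcell; simpa using hcell
      refine ⟨c, hb.2, ?_⟩
      rw [List.any_eq_true]
      set colc := (r0 :: rest).map (fun row => row.getD c "") with hcolc
      have hgetD : colc.getD r "" = v := by
        rw [List.getD_eq_getElem?_getD, colGet (r0 :: rest) W hrect c hb.2 r,
          cellOf_rect _ W hrect, if_pos hb, hval]
        rfl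
      refine ⟨r, List.mem_range.mpr (by simp only [hcolc, List.length_map]; exact hb.1), ?_⟩
      rw [beq_iff_eq, vLoopA_bad competitor kN colc r (by rw [hgetD]; simp [hbad]) kN 0]
      omega

theorem dLoopA_bad (competitor : String) (kN : Nat) (board : List (List String)) (r c : Nat)
    (hg : ¬ goodB competitor ((board.getD r []).getD c "") = true) :
    ∀ fuel i se sw, fuel = kN - i → i < kN →
      dLoopA competitor kN board r c i se sw fuel = (false, false) := by
  intro fuel i se sw h hi
  obtain ⟨f, rfl⟩ : ∃ f, fuel = f + 1 := ⟨fuel - 1, by omega⟩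
  simp only [dLoopA]
  rw [gateA, if_neg hg]

theorem matchCmp_none_flag {board : List (List String)} {r : Nat} {v : String} {o : Int} {i : Nat} :
    (match getElem? board (r + i) with
      | none => false
      | some rowi =>
        match PySem.List.pyGet? rowi o with
        | none => false
        | some w => if (v != w) = true then false else false) = false := by
  cases hb : getElem? board (r + i) with
  | none => simp only [hb]
  | some rowi =>
    simp only [hb]
    cases hx : PySem.List.pyGet? rowi o with
    | none => simp only [hx]
    | some w => simp only [hx]; simp

theorem matchCmp (v : String) (b : Bool) (o : Option String) :
    (match o with
      | none => false
      | some w => if (v != w) = true then false else b) = (b && decide (o = some v)) := by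
  cases o with
  | none => simp
  | some w =>
    dsimp only
    by_cases hvw : v = w
    · subst hvw; simp
    · rw [if_pos (by simp only [bne_iff_ne, ne_eq, decide_eq_true_eq]; exact hvw)]
      simp [Ne.symm hvw]

theorem dLoopA_gen (competitor : String) (kN : Nat) (board : List (List String)) (r c : Nat)
    (hg : goodB competitor ((board.getD r []).getD c "") = true) :
    ∀ fuel i se sw, fuel = kN - i →
      dLoopA competitor kN board r c i se sw fuel =
        (se && decide (∀ j, i ≤ j → j < kN →
            cellOf board (r + j) (c + j) = some ((board.getD r []).getD c "")),
         sw && decide (∀ j, i ≤ j → j < kN →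
            (j ≤ c ∧ cellOf board (r + j) (c - j) = some ((board.getD r []).getD c "")))) := by
  set v := (board.getD r []).getD c "" with hv
  intro fuel
  induction fuel with
  | zero =>
    intro i se sw h
    have h1 : (∀ j, i ≤ j → j < kN → cellOf board (r + j) (c + j) = some v) := by
      intro j h1 h2; omega
    have h2 : (∀ j, i ≤ j → j < kN → (j ≤ c ∧ cellOf board (r + j) (c - j) = some v)) := by
      intro j hj1 hj2; omega
    rw [decide_eq_true h1, decide_eq_true h2]
    simp [dLoopA]
  | succ f ih =>
    intro i se sw h
    have hik : i < kN := by omega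
    simp only [dLoopA]
    rw [gateA, if_pos hg]
    have hse' : (match getElem? board (r + i) with
        | none => false
        | some rowi =>
          match getElem? rowi (c + i) with
          | none => false
          | some w => if (v != w) = true then false else se) =
        (se && decide (cellOf board (r + i) (c + i) = some v)) := by
      unfold cellOf
      cases hb : getElem? board (r + i) with
      | none => simp [hb]
      | some rowi =>
        simp only [hb, Option.bind_some]
        exact matchCmp v se _
    have hsw' : (match getElem? board (r + i) with
        | none => false
        | some rowi =>
          match PySem.List.pyGet? rowi ((c : Int) - (i : Int)) with
          | none => false
          | some w => if (v != w) = true then false else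
              (if (c : Int) - (i : Int) < 0 then false else sw)) =
        (sw && decide (i ≤ c ∧ cellOf board (r + i) (c - i) = some v)) := by
      by_cases hic : i ≤ c
      · rw [show (c : Int) - (i : Int) = ((c - i : Nat) : Int) by omega]
        rw [show (if ((c - i : Nat) : Int) < 0 then false else sw) = sw by rw [if_neg (by omega)]]
        unfold cellOf
        cases hb : getElem? board (r + i) with
        | none => simp [hb]
        | some rowi =>
          simp only [hb, Option.bind_some, PySem.List.pyGet?_natCast]
          rw [matchCmp v sw _]
          simp [hic]
      · rw [show (if (c : Int) - (i : Int) < 0 then false else sw) = false by rw [if_pos (by omega)]]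
        rw [matchCmp_none_flag]
        rw [decide_eq_false (by tauto), Bool.and_false]
    rw [hse', hsw']
    have hsplitSE : decide (∀ j, i ≤ j → j < kN → cellOf board (r + j) (c + j) = some v) =
        (decide (cellOf board (r + i) (c + i) = some v) &&
         decide (∀ j, i + 1 ≤ j → j < kN → cellOf board (r + j) (c + j) = some v)) := by
      rw [← Bool.decide_and, decide_eq_decide]
      constructor
      · intro hall
        exact ⟨hall i le_rfl hik, fun j h1 h2 => hall j (by omega) h2⟩
      · rintro ⟨h1, hall⟩ j hj1 hj2
        by_cases hji : j = i
        · subst hji; exact h1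
        · exact hall j (by omega) hj2
    have hsplitSW : decide (∀ j, i ≤ j → j < kN → (j ≤ c ∧ cellOf board (r + j) (c - j) = some v)) =
        (decide (i ≤ c ∧ cellOf board (r + i) (c - i) = some v) &&
         decide (∀ j, i + 1 ≤ j → j < kN → (j ≤ c ∧ cellOf board (r + j) (c - j) = some v))) := by
      rw [← Bool.decide_and, decide_eq_decide]
      constructor
      · intro hall
        exact ⟨hall i le_rfl hik, fun j h1 h2 => hall j (by omega) h2⟩
      · rintro ⟨h1, hall⟩ j hj1 hj2
        by_cases hji : j = i
        · subst hji; exact h1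
        · exact hall j (by omega) hj2
    by_cases hbreak : (se && decide (cellOf board (r + i) (c + i) = some v)) = false ∧
        (sw && decide (i ≤ c ∧ cellOf board (r + i) (c - i) = some v)) = false
    · rw [if_pos (by rw [hbreak.1, hbreak.2]; rfl)]
      rw [hsplitSE, hsplitSW, ← Bool.and_assoc, ← Bool.and_assoc, hbreak.1, hbreak.2]
      simp
    · rw [if_neg (by
        intro hcon
        simp only [Bool.and_eq_true, beq_iff_eq] at hcon
        exact hbreak ⟨hcon.1, hcon.2⟩)]
      rw [ih (i + 1) _ _ (by omega), hsplitSE, hsplitSW, Prod.mk.injEq]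
      constructor <;> rw [Bool.and_assoc]

theorem cellOf_mem (board : List (List String)) (r c : Nat) (v : String)
    (h : cellOf board r c = some v) : ∃ row ∈ board, v ∈ row := by
  unfold cellOf at h
  cases hb : getElem? board r with
  | none => rw [hb] at h; simp at h
  | some row =>
    rw [hb] at h
    simp only [Option.bind_some] at h
    obtain ⟨hr, heq⟩ := List.getElem?_eq_some_iff.mp hb
    obtain ⟨hc, heqv⟩ := List.getElem?_eq_some_iff.mp h
    exact ⟨row, heq ▸ List.getElem_mem hr, heqv ▸ List.getElem_mem hc⟩

theorem diagWin (competitor : String) (kN : Nat) (board : List (List String)) (W : Nat)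
    (hW : (board.getD 0 []).length = W)
    (hrect : ∀ row ∈ board, row.length = W) (hk1 : 1 ≤ kN) :
    ((List.range board.length).any (fun r =>
        (List.range (board.getD 0 []).length).any (fun c =>
          let p := dLoopA competitor kN board r c 0 true true kN
          p.1 || p.2)) = true ↔
      (pvWinSE competitor kN board ∨ pvWinSW competitor kN board)) := by
  rw [List.any_eq_true]
  constructor
  · rintro ⟨r, hr, hany⟩
    rw [List.mem_range] at hr
    rw [List.any_eq_true] at hany
    obtain ⟨c, hc, hp⟩ := hany
    rw [List.mem_range, hW] at hc
    by_cases hg : goodB competitor ((board.getD r []).getD c "") = true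
    · rw [show (0 : Nat) = 0 from rfl] at hp
      simp only [dLoopA_gen competitor kN board r c hg kN 0 true true (by omega), Bool.true_and,
        Bool.or_eq_true, decide_eq_true_eq] at hp
      rcases hp with hall | hall
      · exact Or.inl ⟨r, c, _, hg, fun i hi => hall i (by omega) hi⟩
      · exact Or.inr ⟨r, c, _, hg, fun i hi => hall i (by omega) hi⟩
    · rw [show (0 : Nat) = 0 from rfl] at hp
      simp only [dLoopA_bad competitor kN board r c hg kN 0 true true (by omega) (by omega)] at hp
      simp at hp
  · have hbuild : ∀ (r c : Nat) (v : String), cellOf board r c = some v →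
        goodB competitor v = true →
        ((∀ j, 0 ≤ j → j < kN → cellOf board (r + j) (c + j) = some v) ∨
         (∀ j, 0 ≤ j → j < kN → (j ≤ c ∧ cellOf board (r + j) (c - j) = some v))) →
        ∃ x ∈ List.range board.length, (List.range (board.getD 0 []).length).any (fun c =>
          let p := dLoopA competitor kN board x c 0 true true kN
          p.1 || p.2) = true := by
      intro r c v hcell hg hwin
      have hrc := hcell
      rw [cellOf_rect board W hrect] at hrc
      have hb : r < board.length ∧ c < W := by
        by_contra hge; rw [if_neg hge] at hrc; simp at hrc
      have hval : (board.getD r []).getD c "" = v := by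
        rw [if_pos hb] at hrc; simpa using hrc
      refine ⟨r, List.mem_range.mpr hb.1, ?_⟩
      rw [List.any_eq_true]
      refine ⟨c, List.mem_range.mpr (by omega), ?_⟩
      have hg' : goodB competitor ((board.getD r []).getD c "") = true := by rw [hval]; exact hg
      simp only [dLoopA_gen competitor kN board r c hg' kN 0 true true (by omega), Bool.true_and,
        Bool.or_eq_true, decide_eq_true_eq, hval]
      exact hwin
    rintro (⟨r, c, v, hg, hall⟩ | ⟨r, c, v, hg, hall⟩)
    · have h0 := hall 0 hk1
      simp only [Nat.add_zero] at h0
      exact hbuild r c v h0 hg (Or.inl (fun j _ hj => hall j hj))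
    · have h0 := (hall 0 hk1).2
      simp only [Nat.add_zero, Nat.sub_zero] at h0
      exact hbuild r c v h0 hg (Or.inr (fun j _ hj => hall j hj))

theorem a_iff (board : List (List String)) (k : Int) (competitor : String)
    (hk : 1 ≤ k) (hrect : ∀ row ∈ board, row.length = (board.headD []).length) :
    (check_if_winner_exists board k competitor = true ↔
      (pvWin competitor k.toNat board ∨ (k = 1 ∧ board ≠ [] ∧ board.headD [] ≠ []))) := by
  have hk1 : 1 ≤ k.toNat := by omega
  cases board with
  | nil =>
    have hfalse : check_if_winner_exists [] k competitor = false := rfl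
    rw [hfalse]
    simp only [Bool.false_eq_true, false_iff]
    rintro (hwin | ⟨-, hne, -⟩)
    · rcases hwin with (⟨r, j, v, hg, hall⟩ | ⟨r, c, v, hg, hall⟩ | ⟨r, c, v, hg, hall⟩ | ⟨r, c, v, hg, hall⟩)
      · have := hall 0 hk1; unfold cellOf at this; simp at this
      · have := hall 0 hk1; unfold cellOf at this; simp at this
      · have := hall 0 hk1; unfold cellOf at this; simp at this
      · have := (hall 0 hk1).2; unfold cellOf at this; simp at this
    · exact hne rfl
  | cons r0 rest =>
    have hrect' : ∀ row ∈ (r0 :: rest), row.length = r0.length := hrect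
    have hite : ∀ (a b c : Bool), ((if a then true else if b then true else c) = true ↔
        (a = true ∨ b = true ∨ c = true)) := by decide
    unfold check_if_winner_exists
    rw [hite]
    rw [horizWin competitor k.toNat (r0 :: rest) hk1,
      vertWin competitor k.toNat (r0 :: rest) r0.length (by simp) rfl hrect' hk1,
      diagWin competitor k.toNat (r0 :: rest) r0.length rfl hrect' hk1]
    unfold pvWin
    constructor
    · rintro (hH | (hV | ⟨hkN1, r, c, v, hcell, hbad⟩) | (hSE | hSW))
      · exact Or.inl (Or.inl hH)
      · exact Or.inl (Or.inr (Or.inl hV))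
      · refine Or.inr ⟨by omega, by simp, ?_⟩
        rw [cellOf_rect _ r0.length hrect'] at hcell
        have hb : r < (r0 :: rest).length ∧ c < r0.length := by
          by_contra hge; rw [if_neg hge] at hcell; simp at hcell
        simp only [List.headD_cons]
        intro hr0
        rw [hr0] at hb
        simp at hb
      · exact Or.inl (Or.inr (Or.inr (Or.inl hSE)))
      · exact Or.inl (Or.inr (Or.inr (Or.inr hSW)))
    · rintro (hwin | ⟨hk1', -, hhne⟩)
      · rcases hwin with (hH | hV | hSE | hSW)
        · exact Or.inl hH
        · exact Or.inr (Or.inl (Or.inl hV))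
        · exact Or.inr (Or.inr (Or.inl hSE))
        · exact Or.inr (Or.inr (Or.inr hSW))
      · have hkN1 : k.toNat = 1 := by omega
        have hW1 : 1 ≤ r0.length := by
          simp only [List.headD_cons] at hhne
          cases r0 with
          | nil => exact absurd rfl hhne
          | cons a b => simp
        have hcell : cellOf (r0 :: rest) 0 0 = some ((r0 :: rest).getD 0 [] |>.getD 0 "") := by
          rw [cellOf_rect _ r0.length hrect', if_pos ⟨by simp, by omega⟩]
        by_cases hg : goodB competitor (((r0 :: rest).getD 0 []).getD 0 "") = true
        · refine Or.inl ⟨0, 0, _, hg, fun i hi => ?_⟩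
          have : i = 0 := by omega
          subst this
          simpa using hcell
        · exact Or.inr (Or.inl (Or.inr ⟨hkN1, 0, 0, _, hcell, by simpa using hg⟩))

-- ===== VERDICT (by name: the statement is the Claim_ definition above) =====
theorem check_if_winner_exists_spec : Claim_unchanged_check_if_winner_exists := by
  intro board k competitor hdom hpre hnd
  obtain ⟨hk, hrect⟩ := hpre
  have hA := a_iff board k competitor hk hrect
  have hB := alt_iff board k competitor hk hrect
  by_cases hwin : pvWin competitor k.toNat board
  · rw [hA.mpr (Or.inl hwin), hB.mpr hwin]
  · have hBf : check_if_winner_exists_alt board k competitor = false := by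
      cases hb : check_if_winner_exists_alt board k competitor
      · rfl
      · exact absurd (hB.mp hb) hwin
    have hAf : check_if_winner_exists board k competitor = false := by
      cases ha : check_if_winner_exists board k competitor
      · rfl
      · exfalso
        rcases hA.mp ha with hw | ⟨hk1, hne, hhne⟩
        · exact hwin hw
        · apply hnd
          refine ⟨hk1, hne, hhne, fun row hrow v hv => ?_⟩
          by_cases hg : goodB competitor v = true
          · exfalso
            apply hwin
            obtain ⟨r, hr⟩ := List.mem_iff_getElem?.mp hrow
            obtain ⟨j, hj⟩ := List.mem_iff_getElem?.mp hv
            refine Or.inl ⟨r, j, v, hg, fun i hi => ?_⟩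
            have hi0 : i = 0 := by omega
            subst hi0
            unfold cellOf
            rw [hr]
            simpa using hj
          · exact (goodB_false_iff competitor v).mp (by
              cases hgb : goodB competitor v
              · rfl
              · exact absurd hgb hg)
    rw [hAf, hBf]

theorem check_if_winner_exists_changed : Claim_changed_check_if_winner_exists := by
  unfold Claim_changed_check_if_winner_exists; decide

theorem check_if_winner_exists_tight : Claim_exact_check_if_winner_exists := by
  intro board k competitor hdom hpre hD
  obtain ⟨hk, hrect⟩ := hpre
  obtain ⟨hk1, hne, hhne, hbad⟩ := hD
  have hk1' : 1 ≤ k.toNat := by omega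
  have hA : check_if_winner_exists board k competitor = true :=
    (a_iff board k competitor hk hrect).mpr (Or.inr ⟨hk1, hne, hhne⟩)
  have hnw : ¬ pvWin competitor k.toNat board := by
    intro hwin
    have hcell : ∃ r c v, cellOf board r c = some v ∧ goodB competitor v = true := by
      rcases hwin with (⟨r, j, v, hg, hall⟩ | ⟨r, c, v, hg, hall⟩ | ⟨r, c, v, hg, hall⟩ |
        ⟨r, c, v, hg, hall⟩)
      · exact ⟨r, j, v, by simpa using hall 0 hk1', hg⟩
      · exact ⟨r, c, v, by simpa using hall 0 hk1', hg⟩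
      · exact ⟨r, c, v, by simpa using hall 0 hk1', hg⟩
      · exact ⟨r, c, v, by simpa using (hall 0 hk1').2, hg⟩
    obtain ⟨r, c, v, hcell, hg⟩ := hcell
    obtain ⟨row, hrow, hvrow⟩ := cellOf_mem board r c v hcell
    have hgf : goodB competitor v = false :=
      (goodB_false_iff competitor v).mpr (hbad row hrow v hvrow)
    rw [hgf] at hg
    exact Bool.false_ne_true hg
  have hBf : check_if_winner_exists_alt board k competitor = false := by
    cases hb : check_if_winner_exists_alt board k competitor
    · rfl
    · exact absurd ((alt_iff board k competitor hk hrect).mp hb) hnw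
  rw [hA, hBf]
  simp
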